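-- pv_equiv track=rewrite | github.com/arnabs542/algorithm_note | 1016/string2.py | cmd_mid
-- ===== SOURCE A (Python) =====
-- def cmd_mid(x, cur):
--     lens = []
--     for i in x:
--         lens.append(len(i))
--     mid = int(sum(lens) / 2)
--
--     current, index = 0, 0 # sum of totall length, row of list
--     while True:
--         current += lens[index]
--         if current >= mid:
--             break
--         index += 1
--     return (index, mid - index)
-- ===== SOURCE B (Python) =====
-- from bisect import bisect_left
-- from itertools import accumulate
--
--
-- def cmd_mid(x, cur):
--     prefix = list(accumulate(map(len, x)))
--     mid = int(prefix[-1] / 2)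
--     index = bisect_left(prefix, mid)
--     return (index, mid - index)
-- ===== Notes on version B (the rewrite author's own statement) =====
-- stated objective: alternative
-- what changed: Replaces A's append loop plus linear break-on-threshold while scan by a prefix-sum table (itertools.accumulate) followed by a binary search (bisect.bisect_left) for the first cumulative length reaching the midpoint.
import Mathlib
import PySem

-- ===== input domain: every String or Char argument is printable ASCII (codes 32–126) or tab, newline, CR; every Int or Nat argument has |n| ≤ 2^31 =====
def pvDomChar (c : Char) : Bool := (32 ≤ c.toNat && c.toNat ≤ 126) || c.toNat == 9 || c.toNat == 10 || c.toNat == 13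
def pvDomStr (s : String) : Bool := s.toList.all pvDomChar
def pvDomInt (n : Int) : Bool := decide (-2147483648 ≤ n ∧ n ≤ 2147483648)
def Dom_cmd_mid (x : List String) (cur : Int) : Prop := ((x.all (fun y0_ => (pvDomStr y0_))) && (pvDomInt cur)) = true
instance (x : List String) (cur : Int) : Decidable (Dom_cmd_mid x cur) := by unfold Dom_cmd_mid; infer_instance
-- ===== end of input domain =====

-- B replaces A's append loop + break-on-threshold while scan by a prefix-sum table and a
-- bisect_left binary search for the first cumulative length reaching the midpoint
-- (alternative decomposition; build is still O(n), the search itself is O(log n)).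
-- A raises IndexError on x = [] (lens[0] / prefix[-1]); Pre_ excludes exactly that.


-- ===== PORT A =====
-- the 'while True: current += lens[index]; if current >= mid: break; index += 1' loop,
-- walking the lens list; the [] case is Python's IndexError (outside Pre_, unreached there)
def cmdMidLoopA (lens : List Int) (current index mid : Int) : Int × Int :=
  match lens with
  | [] => (index, mid - index)
  | h :: t =>
    let current' := current + h
    if current' ≥ mid then (index, mid - index)
    else cmdMidLoopA t current' (index + 1) mid

def cmd_mid (x : List String) (cur : Int) : Int × Int :=
  let lens := x.foldl (fun acc i => acc ++ [PySem.Str.len i]) []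
  -- int(sum(lens)/2): sum ≥ 0 and within Dom the float division is exact, so floor division
  let mid := PySem.Int.floordiv lens.sum 2
  cmdMidLoopA lens 0 0 mid

-- ===== PORT B =====
-- itertools.accumulate over the lengths
def accumB (acc : Int) (l : List Int) : List Int :=
  match l with
  | [] => []
  | h :: t => (acc + h) :: accumB (acc + h) t

-- bisect.bisect_left(a, val): while lo < hi: mid = (lo+hi)//2; if a[mid] < val: lo = mid+1 else hi = mid
-- a[mid] is always in range (lo ≤ mid < hi ≤ len), so getD with default 0 is exact here;
-- the loop shrinks hi - lo each turn, so fuel = initial hi is enough and is never exhausted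
def bisectLeftB (a : List Int) (val : Int) : Nat → Nat → Nat → Nat
  | 0, lo, _ => lo
  | fuel + 1, lo, hi =>
    if lo < hi then
      let mid := (lo + hi) / 2
      if a.getD mid 0 < val then bisectLeftB a val fuel (mid + 1) hi
      else bisectLeftB a val fuel lo mid
    else lo

def cmd_mid_alt (x : List String) (cur : Int) : Int × Int :=
  let pre := accumB 0 (x.map fun s => PySem.Str.len s)
  match PySem.List.pyGet? pre (-1) with
  | none => (0, 0)  -- prefix[-1] on empty x: Python IndexError (outside Pre_)
  | some total =>
    let mid := PySem.Int.floordiv total 2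
    let index : Int := (bisectLeftB pre mid pre.length 0 pre.length : Nat)
    (index, mid - index)

-- ===== PRECONDITION & SPEC =====
-- Pre_ excludes exactly the empty list, on which both Pythons raise IndexError.
def Pre_cmd_mid (x : List String) (cur : Int) : Prop := x ≠ []
instance (x : List String) (cur : Int) : Decidable (Pre_cmd_mid x cur) := by unfold Pre_cmd_mid; infer_instance
def pvWitness_cmd_mid : List String × Int := (["ab", "c"], 0)

def Spec_cmd_mid (x : List String) (cur : Int) (out : Int × Int) : Prop := out = cmd_mid_alt x cur
instance (x : List String) (cur : Int) (out : Int × Int) : Decidable (Spec_cmd_mid x cur out) := by unfold Spec_cmd_mid; infer_instance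

-- ===== CLAIM (what is proved, stated in full; the proofs are below) =====
def Claim_equal_cmd_mid : Prop := ∀ (x : List String) (cur : Int), Dom_cmd_mid x cur → Pre_cmd_mid x cur → Spec_cmd_mid x cur (cmd_mid x cur)

-- ===== LEMMAS AND PROOFS =====

theorem foldl_append_len (x : List String) (acc : List Int) :
    x.foldl (fun acc i => acc ++ [PySem.Str.len i]) acc = acc ++ x.map (fun s => PySem.Str.len s) := by
  induction x generalizing acc with
  | nil => simp
  | cons h t ih => rw [List.foldl_cons, ih]; simp

-- A's scan stops at the first index whose cumulative sum reaches mid,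
-- i.e. at the number of strict prefixes below mid
theorem accumB_nonneg_countP (t : List Int) (c mid : Int)
    (hnn : ∀ y ∈ t, 0 ≤ y) (hc : mid ≤ c) :
    (accumB c t).countP (fun p => p < mid) = 0 := by
  induction t generalizing c with
  | nil => simp [accumB]
  | cons h tl ih =>
    have h0 : 0 ≤ h := hnn h (by simp)
    have h1 : ¬ (c + h < mid) := by omega
    simp only [accumB, List.countP_cons]
    rw [ih _ (fun y hy => hnn y (by simp [hy])) (by omega)]
    simp [h1]

theorem loopA_eq_count (lens : List Int) (current index mid : Int)
    (hnn : ∀ y ∈ lens, 0 ≤ y) (hne : lens ≠ [])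
    (htot : mid ≤ current + lens.sum) :
    cmdMidLoopA lens current index mid =
      (index + ((accumB current lens).countP (fun p => p < mid) : Nat),
       mid - (index + ((accumB current lens).countP (fun p => p < mid) : Nat))) := by
  induction lens generalizing current index with
  | nil => exact absurd rfl hne
  | cons h t ih =>
    simp only [cmdMidLoopA, accumB, List.countP_cons]
    by_cases hge : current + h ≥ mid
    · rw [if_pos hge]
      rw [accumB_nonneg_countP t (current + h) mid (fun y hy => hnn y (by simp [hy])) (by omega)]
      simp only [decide_eq_true_eq]
      rw [if_neg (by omega)]
      simp
    · rw [if_neg hge]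
      have hsum : 0 ≤ t.sum := List.sum_nonneg (fun y hy => hnn y (by simp [hy]))
      have htne : t ≠ [] := by
        intro h'
        subst h'
        simp at htot
        omega
      rw [ih (current + h) (index + 1) (fun y hy => hnn y (by simp [hy])) htne
          (by simp at htot ⊢; omega)]
      rw [if_pos (by simp; omega)]
      simp only [Prod.mk.injEq]
      push_cast
      omega

theorem accumB_getLast (t : List Int) (c : Int) (h : t ≠ []) :
    (accumB c t).getLast? = some (c + t.sum) := by
  induction t generalizing c with
  | nil => exact absurd rfl h
  | cons a tl ih =>
    cases htl : tl with
    | nil => simp [accumB]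
    | cons b tb =>
      subst htl
      rw [accumB, accumB, List.getLast?_cons_cons]
      rw [show (c + a + b) :: accumB (c + a + b) tb = accumB (c + a) (b :: tb) from rfl]
      rw [ih (c + a) (by simp)]
      simp
      ring

-- every accumulated prefix starting from c stays ≥ c when the summands are nonnegative
theorem accumB_le_mem (t : List Int) (c : Int) (hnn : ∀ y ∈ t, 0 ≤ y) :
    ∀ y ∈ accumB c t, c ≤ y := by
  induction t generalizing c with
  | nil => simp [accumB]
  | cons h tl ih =>
    intro y hy
    have h0 : 0 ≤ h := hnn h (by simp)
    simp only [accumB, List.mem_cons] at hy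
    rcases hy with rfl | hy
    · omega
    · have := ih (c + h) (fun z hz => hnn z (by simp [hz])) y hy
      omega

theorem accumB_pairwise (t : List Int) (c : Int) (hnn : ∀ y ∈ t, 0 ≤ y) :
    (accumB c t).Pairwise (· ≤ ·) := by
  induction t generalizing c with
  | nil => simp [accumB]
  | cons h tl ih =>
    simp only [accumB, List.pairwise_cons]
    exact ⟨accumB_le_mem tl (c + h) (fun z hz => hnn z (by simp [hz])),
           ih (c + h) (fun z hz => hnn z (by simp [hz]))⟩

theorem pairwise_getD_mono (a : List Int) (hp : a.Pairwise (· ≤ ·)) :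
    ∀ i j : Nat, i ≤ j → j < a.length → a.getD i 0 ≤ a.getD j 0 := by
  intro i j hij hj
  rcases Nat.lt_or_ge i j with hlt | hge
  · have hi : i < a.length := by omega
    rw [List.getD_eq_getElem a 0 hi, List.getD_eq_getElem a 0 hj]
    exact (List.pairwise_iff_getElem.mp hp) i j hi hj hlt
  · have : i = j := by omega
    subst this
    rfl

-- with k marking the exact cutoff between elements < val and elements ≥ val,
-- the count of elements < val is k (no sortedness needed)
theorem countP_cutoff (a : List Int) (val : Int) (k : Nat)
    (hk : k ≤ a.length)
    (h1 : ∀ i : Nat, i < k → a.getD i 0 < val)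
    (h2 : ∀ i : Nat, k ≤ i → i < a.length → ¬ (a.getD i 0 < val)) :
    a.countP (fun p => p < val) = k := by
  induction a generalizing k with
  | nil => simp at hk ⊢; omega
  | cons h t ih =>
    cases k with
    | zero =>
      have hh : ¬ (h < val) := by simpa using h2 0 (by omega) (by simp)
      have ht : t.countP (fun p => p < val) = 0 := by
        apply ih 0 (by omega) (by omega)
        intro i _ hi
        simpa using h2 (i + 1) (by omega) (by simp; omega)
      simp [ht, hh]
    | succ k' =>
      have hh : h < val := by simpa using h1 0 (by omega)
      have ht : t.countP (fun p => p < val) = k' := by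
        apply ih k' (by simp at hk; omega)
        · intro i hi
          simpa using h1 (i + 1) (by omega)
        · intro i hi hil
          simpa using h2 (i + 1) (by omega) (by simp; omega)
      simp [ht, hh]

-- bisect_left on a nondecreasing table returns the count of elements below val,
-- provided everything left of lo is < val and everything right of hi is ≥ val
theorem bisect_eq_countP (a : List Int) (val : Int)
    (hmono : ∀ i j : Nat, i ≤ j → j < a.length → a.getD i 0 ≤ a.getD j 0) :
    ∀ (n lo hi : Nat), hi - lo ≤ n → lo ≤ hi → hi ≤ a.length →
    (∀ i : Nat, i < lo → a.getD i 0 < val) →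
    (∀ i : Nat, hi ≤ i → i < a.length → ¬ (a.getD i 0 < val)) →
    bisectLeftB a val n lo hi = a.countP (fun p => p < val) := by
  intro n
  induction n with
  | zero =>
    intro lo hi hn hle hlen h1 h2
    have : lo = hi := by omega
    subst this
    rw [bisectLeftB]
    exact (countP_cutoff a val lo (by omega) h1 (fun i hi' hil => h2 i (by omega) hil)).symm
  | succ m ih =>
    intro lo hi hn hle hlen h1 h2
    rw [bisectLeftB]
    by_cases hlt : lo < hi
    · rw [if_pos hlt]
      have hm1 : lo ≤ (lo + hi) / 2 := by omega
      have hm2 : (lo + hi) / 2 < hi := by omega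
      by_cases hv : a.getD ((lo + hi) / 2) 0 < val
      · rw [if_pos hv]
        apply ih ((lo + hi) / 2 + 1) hi (by omega) (by omega) hlen
        · intro i hi'
          by_cases hcase : i < lo
          · exact h1 i hcase
          · have := hmono i ((lo + hi) / 2) (by omega) (by omega)
            omega
        · exact h2
      · rw [if_neg hv]
        apply ih lo ((lo + hi) / 2) (by omega) (by omega) (by omega) h1
        intro i hi' hil hcon
        by_cases hcase : i < hi
        · have := hmono ((lo + hi) / 2) i (by omega) (by omega)
          omega
        · exact h2 i (by omega) hil hcon
    · rw [if_neg hlt]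
      have : lo = hi := by omega
      subst this
      exact (countP_cutoff a val lo (by omega) h1 (fun i hi' hil => h2 i (by omega) hil)).symm

-- ===== VERDICT (by name: the statement is the Claim_ definition above) =====
theorem cmd_mid_spec : Claim_equal_cmd_mid := by
  intro x cur _ hpre
  unfold Spec_cmd_mid cmd_mid cmd_mid_alt
  rw [foldl_append_len x []]
  simp only [List.nil_append]
  set lens := x.map (fun s => PySem.Str.len s) with hlens
  have hne : lens ≠ [] := by
    simp [hlens]
    exact hpre
  have hnn : ∀ y ∈ lens, 0 ≤ y := by
    intro y hy
    simp [hlens] at hy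
    obtain ⟨s, _, hs⟩ := hy
    simp [← hs]
  have hlast : (accumB 0 lens).getLast? = some lens.sum := by
    rw [accumB_getLast lens 0 hne]; simp
  rw [PySem.List.pyGet?_neg_one, hlast]
  simp only
  have hsum0 : 0 ≤ lens.sum := List.sum_nonneg hnn
  have hmid : PySem.Int.floordiv lens.sum 2 ≤ 0 + lens.sum := by
    have : PySem.Int.floordiv lens.sum 2 = lens.sum / 2 := by
      unfold PySem.Int.floordiv
      exact Int.fdiv_eq_ediv_of_nonneg _ (by omega)
    omega
  rw [loopA_eq_count lens 0 0 (PySem.Int.floordiv lens.sum 2) hnn hne hmid]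
  rw [bisect_eq_countP (accumB 0 lens) (PySem.Int.floordiv lens.sum 2)
        (pairwise_getD_mono _ (accumB_pairwise lens 0 hnn))
        (accumB 0 lens).length 0 (accumB 0 lens).length (by omega) (by omega) (le_refl _)
        (by omega) (fun i hi hil => by omega)]
  simp
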